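-- pv_equiv track=rewrite | github.com/david-andrew/dewy-lang | udewy/backend/arm.py | _frame_pointer_setup_instrs
-- ===== SOURCE A (Python) =====
-- def _frame_pointer_setup_instrs(local_bytes: int) -> list[str]:
--     instrs = ["    mov x29, sp"]
--     remaining = local_bytes
--     while remaining > 0:
--         chunk = min(remaining, 4095)
--         instrs.append(f"    add x29, x29, #{chunk}")
--         remaining -= chunk
--     return instrs
-- ===== SOURCE B (Python) =====
-- def _frame_pointer_setup_instrs(local_bytes: int) -> list[str]:
--     n = max(local_bytes, 0)
--     full, rem = divmod(n, 4095)
--     instrs = ["    mov x29, sp"] + ["    add x29, x29, #4095"] * full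
--     if rem > 0:
--         instrs.append(f"    add x29, x29, #{rem}")
--     return instrs
-- ===== Notes on version B (the rewrite author's own statement) =====
-- stated objective: simpler
-- what changed: Replaces the iterative chunk-subtraction while-loop with a closed-form divmod of the clamped byte count by the chunk size, emitting the full chunks by list multiplication and one optional remainder line.
import Mathlib
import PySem

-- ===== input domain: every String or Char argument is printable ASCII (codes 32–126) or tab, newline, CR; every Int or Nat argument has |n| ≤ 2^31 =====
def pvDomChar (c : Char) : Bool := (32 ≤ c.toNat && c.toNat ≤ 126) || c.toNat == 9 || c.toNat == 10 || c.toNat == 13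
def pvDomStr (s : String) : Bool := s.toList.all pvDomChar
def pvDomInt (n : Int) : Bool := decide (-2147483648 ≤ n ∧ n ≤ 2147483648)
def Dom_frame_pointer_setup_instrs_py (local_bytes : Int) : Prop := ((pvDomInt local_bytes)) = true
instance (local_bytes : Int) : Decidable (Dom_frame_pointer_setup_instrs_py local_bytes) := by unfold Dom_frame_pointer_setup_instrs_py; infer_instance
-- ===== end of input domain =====

-- B replaces A's chunk-subtraction while-loop with a closed-form divmod emission of the chunk lines (objective: simpler).


-- ===== PORT A =====
-- the while loop: state is (remaining, instrs)
def fpLoopA (remaining : Int) (instrs : List String) : List String :=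
  if h : remaining > 0 then
    let chunk := min remaining 4095
    fpLoopA (remaining - chunk) (instrs ++ ["    add x29, x29, #" ++ PySem.Int.toStr chunk])
  else instrs
termination_by remaining.toNat
decreasing_by omega

def frame_pointer_setup_instrs_py (local_bytes : Int) : List String :=
  fpLoopA local_bytes ["    mov x29, sp"]

-- ===== PORT B =====
def frame_pointer_setup_instrs_py_alt (local_bytes : Int) : List String :=
  let n := max local_bytes 0
  let full := PySem.Int.floordiv n 4095
  let rem := PySem.Int.mod n 4095
  let instrs := ["    mov x29, sp"] ++ List.replicate full.toNat "    add x29, x29, #4095"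
  if rem > 0 then instrs ++ ["    add x29, x29, #" ++ PySem.Int.toStr rem] else instrs

-- ===== PRECONDITION & SPEC =====
def Spec_frame_pointer_setup_instrs_py (local_bytes : Int) (out : List String) : Prop := out = frame_pointer_setup_instrs_py_alt local_bytes
instance (local_bytes : Int) (out : List String) : Decidable (Spec_frame_pointer_setup_instrs_py local_bytes out) := by unfold Spec_frame_pointer_setup_instrs_py; infer_instance

-- ===== CLAIM (what is proved, stated in full; the proofs are below) =====
def Claim_equal_frame_pointer_setup_instrs_py : Prop := ∀ (local_bytes : Int), Dom_frame_pointer_setup_instrs_py local_bytes → Spec_frame_pointer_setup_instrs_py local_bytes (frame_pointer_setup_instrs_py local_bytes)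

-- ===== LEMMAS AND PROOFS =====

-- the suffix the loop appends for a given remaining value, in closed form
def fpTail (r : Int) : List String :=
  List.replicate (PySem.Int.floordiv (max r 0) 4095).toNat "    add x29, x29, #4095" ++
    (if PySem.Int.mod (max r 0) 4095 > 0 then
      ["    add x29, x29, #" ++ PySem.Int.toStr (PySem.Int.mod (max r 0) 4095)] else [])

lemma fpLoopA_spec (r : Int) (acc : List String) : fpLoopA r acc = acc ++ fpTail r := by
  rw [fpLoopA]
  by_cases h : r > 0
  · simp only [h, dite_true]
    rw [fpLoopA_spec (r - min r 4095) _]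
    by_cases h4 : r ≥ 4095
    · have hc : min r 4095 = (4095 : Int) := by omega
      rw [hc]
      have hmax : max r 0 = r := by omega
      have hmax' : max (r - (4095:Int)) 0 = r - 4095 := by omega
      have hdiv : PySem.Int.floordiv r 4095 = PySem.Int.floordiv (r - 4095) 4095 + 1 := by
        rw [PySem.Int.floordiv_eq_ediv_of_pos (by norm_num),
            PySem.Int.floordiv_eq_ediv_of_pos (by norm_num)]
        omega
      have hmod : PySem.Int.mod r 4095 = PySem.Int.mod (r - 4095) 4095 := by
        rw [PySem.Int.mod_eq_emod_of_pos (by norm_num),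
            PySem.Int.mod_eq_emod_of_pos (by norm_num)]
        omega
      have hdnn : 0 ≤ PySem.Int.floordiv (r - 4095) 4095 := by
        rw [PySem.Int.floordiv_eq_ediv_of_pos (by norm_num)]; omega
      have hstr : "    add x29, x29, #" ++ PySem.Int.toStr (4095:Int) = "    add x29, x29, #4095" := by decide
      simp only [fpTail, hmax, hmax', hdiv, hmod]
      rw [Int.toNat_add hdnn (by norm_num)]
      simp [List.replicate_succ, hstr, List.append_assoc]
    · have hc : min r 4095 = r := by omega
      rw [hc, sub_self]
      have ht0 : fpTail (0:Int) = [] := by decide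
      have hmax : max r 0 = r := by omega
      have hdiv : PySem.Int.floordiv r 4095 = 0 := by
        rw [PySem.Int.floordiv_eq_ediv_of_pos (by norm_num)]; omega
      have hmod : PySem.Int.mod r 4095 = r := by
        rw [PySem.Int.mod_eq_emod_of_pos (by norm_num)]; omega
      rw [ht0]
      unfold fpTail
      rw [hmax, hdiv, hmod]
      simp [h]
  · simp only [h, dite_false]
    have hmax : max r 0 = 0 := by omega
    have ht0 : fpTail (0:Int) = [] := by decide
    have : fpTail r = fpTail 0 := by unfold fpTail; rw [hmax]; norm_num
    rw [this, ht0, List.append_nil]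
termination_by r.toNat
decreasing_by omega

-- ===== VERDICT (by name: the statement is the Claim_ definition above) =====
theorem frame_pointer_setup_instrs_py_spec : Claim_equal_frame_pointer_setup_instrs_py := by
  intro local_bytes _
  unfold Spec_frame_pointer_setup_instrs_py frame_pointer_setup_instrs_py
    frame_pointer_setup_instrs_py_alt
  rw [fpLoopA_spec]
  simp only [fpTail]
  split_ifs <;> simp
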